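-- pv_equiv track=rewrite | github.com/lazcanoluca/gestion-grupo-4 | back/scheduler.py | agrupar_cursos_por_materia
-- ===== SOURCE A (Python) =====
-- from typing import List, Dict, Any
--
-- def agrupar_cursos_por_materia(cursos: List[Dict]) -> Dict[str, List[Dict]]:
--     """
--     Agrupa cursos por materia.
--     Retorna: {materia_codigo: [lista de cursos de esa materia]}
--     """
--     materias = {}
--     for curso in cursos:
--         materia_codigo = curso['materia']['codigo']
--         if materia_codigo not in materias:
--             materias[materia_codigo] = []
--         materias[materia_codigo].append(curso)
--     return materias
-- ===== SOURCE B (Python) =====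
-- from typing import List, Dict, Any
--
-- def agrupar_cursos_por_materia(cursos: List[Dict]) -> Dict[str, List[Dict]]:
--     codigos = list(dict.fromkeys(c['materia']['codigo'] for c in cursos))
--     return {cod: [c for c in cursos if c['materia']['codigo'] == cod] for cod in codigos}
-- ===== Notes on version B (the rewrite author's own statement) =====
-- stated objective: alternative
-- what changed: B replaces A's single-pass dict building (check-insert-append per course) by a two-phase scheme: first an ordered dedup of the subject codes, then one filter pass per code in a dict comprehension.
import Mathlib
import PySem

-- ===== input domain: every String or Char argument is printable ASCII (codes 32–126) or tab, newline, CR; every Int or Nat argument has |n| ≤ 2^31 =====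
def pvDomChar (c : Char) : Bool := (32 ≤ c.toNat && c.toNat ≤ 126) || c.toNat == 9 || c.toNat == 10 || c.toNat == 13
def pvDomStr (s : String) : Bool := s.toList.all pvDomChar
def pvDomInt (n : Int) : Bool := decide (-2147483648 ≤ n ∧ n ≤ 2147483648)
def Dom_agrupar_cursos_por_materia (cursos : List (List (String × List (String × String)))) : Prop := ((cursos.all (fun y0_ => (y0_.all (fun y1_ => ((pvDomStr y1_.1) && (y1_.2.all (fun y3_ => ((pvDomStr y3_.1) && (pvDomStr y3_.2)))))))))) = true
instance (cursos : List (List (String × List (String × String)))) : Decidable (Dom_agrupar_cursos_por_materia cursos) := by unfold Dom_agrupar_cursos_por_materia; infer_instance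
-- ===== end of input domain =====

-- B groups by first collecting the distinct subject codes in order (dict.fromkeys) and then
-- filtering the course list once per code, instead of A's single-pass dict check-insert-append.

-- curso['materia']['codigo'] : none exactly where Python raises KeyError (excluded by Pre_)
def pvKey (curso : List (String × List (String × String))) : Option String :=
  ((PySem.Dict.mk curso).get? "materia").bind (fun m => (PySem.Dict.mk m).get? "codigo")

-- ===== PORT A =====
def agrupar_cursos_por_materia (cursos : List (List (String × List (String × String)))) : List (String × List (List (String × List (String × String)))) :=
  (cursos.foldl
    (fun (materias : PySem.Dict String (List (List (String × List (String × String))))) curso =>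
      let materia_codigo := (pvKey curso).getD ""   -- Pre_ guarantees the key exists
      let materias := if materias.contains materia_codigo then materias
                      else materias.insert materia_codigo []
      materias.modify materia_codigo [] (· ++ [curso]))
    PySem.Dict.empty).items

-- ===== PORT B =====
def agrupar_cursos_por_materia_alt (cursos : List (List (String × List (String × String)))) : List (String × List (List (String × List (String × String)))) :=
  let codigos := PySem.List.dedup (cursos.map (fun c => (pvKey c).getD ""))
  codigos.map (fun cod => (cod, cursos.filter (fun c => (pvKey c).getD "" == cod)))

-- ===== PRECONDITION & SPEC =====
-- Pre_ excludes courses lacking the 'materia' or 'codigo' key, where Python A raises KeyError.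
def Pre_agrupar_cursos_por_materia (cursos : List (List (String × List (String × String)))) : Prop :=
  ∀ curso ∈ cursos, (pvKey curso).isSome
instance (cursos : List (List (String × List (String × String)))) : Decidable (Pre_agrupar_cursos_por_materia cursos) := by unfold Pre_agrupar_cursos_por_materia; infer_instance

def pvWitness_agrupar_cursos_por_materia : (List (List (String × List (String × String)))) :=
  [[("materia", [("codigo", "M1")])], [("materia", [("codigo", "M2")])], [("materia", [("codigo", "M1")])]]

def Spec_agrupar_cursos_por_materia (cursos : List (List (String × List (String × String)))) (out : List (String × List (List (String × List (String × String))))) : Prop := out = agrupar_cursos_por_materia_alt cursos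
instance (cursos : List (List (String × List (String × String)))) (out : List (String × List (List (String × List (String × String))))) : Decidable (Spec_agrupar_cursos_por_materia cursos out) := by
  unfold Spec_agrupar_cursos_por_materia
  haveI : DecidableEq (List (List (String × List (String × String)))) := inferInstance
  infer_instance

-- ===== CLAIM (what is proved, stated in full; the proofs are below) =====
def Claim_equal_agrupar_cursos_por_materia : Prop := ∀ (cursos : List (List (String × List (String × String)))), Dom_agrupar_cursos_por_materia cursos → Pre_agrupar_cursos_por_materia cursos → Spec_agrupar_cursos_por_materia cursos (agrupar_cursos_por_materia cursos)

-- ===== LEMMAS AND PROOFS =====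

-- A's body (check-insert-then-append) is one dict `modify` at the course's key.
lemma pvStepEq (d : PySem.Dict String (List (List (String × List (String × String))))) (curso : List (String × List (String × String))) :
    (let k := (pvKey curso).getD ""
     let d' := if d.contains k then d else d.insert k []
     d'.modify k [] (· ++ [curso]))
    = d.modify ((pvKey curso).getD "") [] (· ++ [curso]) := by
  by_cases h : d.contains ((pvKey curso).getD "")
  · simp [h]
  · simp only [h, Bool.false_eq_true, if_false, PySem.Dict.modify]
    rw [PySem.Dict.getD_insert_self, PySem.Dict.insert_insert_self,
      PySem.Dict.getD_of_not_contains d [] (by simpa using h)]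

-- ===== VERDICT (by name: the statement is the Claim_ definition above) =====
theorem agrupar_cursos_por_materia_spec : Claim_equal_agrupar_cursos_por_materia := by
  intro cursos _ _
  unfold Spec_agrupar_cursos_por_materia agrupar_cursos_por_materia agrupar_cursos_por_materia_alt
  have hfold :
      cursos.foldl
        (fun (materias : PySem.Dict String (List (List (String × List (String × String))))) curso =>
          let materia_codigo := (pvKey curso).getD ""
          let materias := if materias.contains materia_codigo then materias
                          else materias.insert materia_codigo []
          materias.modify materia_codigo [] (· ++ [curso]))
        PySem.Dict.empty
      = cursos.foldl
          (fun d curso => d.modify ((pvKey curso).getD "") [] (· ++ [curso])) PySem.Dict.empty :=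
    List.foldl_ext _ _ _ (fun d c _ => pvStepEq d c)
  have hnd :
      (cursos.foldl
        (fun d curso => d.modify ((pvKey curso).getD "") [] (· ++ [curso]))
        (PySem.Dict.empty : PySem.Dict String (List (List (String × List (String × String)))))).keys.Nodup :=
    PySem.Dict.nodup_keys_foldl_modify_key cursos (fun c => (pvKey c).getD "")
      [] (fun _ c => (· ++ [c])) PySem.Dict.empty (by simp)
  have hkeys :
      (cursos.foldl
        (fun d curso => d.modify ((pvKey curso).getD "") [] (· ++ [curso]))
        (PySem.Dict.empty : PySem.Dict String (List (List (String × List (String × String)))))).keys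
      = PySem.List.dedup (cursos.map (fun c => (pvKey c).getD "")) := by
    rw [PySem.Dict.keys_foldl_modify_key cursos (fun c => (pvKey c).getD "")
      [] (fun _ c => (· ++ [c])) PySem.Dict.empty]
    simp only [PySem.Dict.keys, PySem.Dict.empty, List.map_nil, PySem.Set.update_nil_left,
      PySem.List.dedup_eq_ofList]
  have hgetD : ∀ k,
      (cursos.foldl
        (fun d curso => d.modify ((pvKey curso).getD "") [] (· ++ [curso]))
        (PySem.Dict.empty : PySem.Dict String (List (List (String × List (String × String)))))).getD k []
      = cursos.filter (fun c => (pvKey c).getD "" == k) := by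
    intro k
    have := PySem.Dict.getD_foldl_modify_append
      (cursos.map (fun c => ((pvKey c).getD "", c)))
      (PySem.Dict.empty : PySem.Dict String (List (List (String × List (String × String))))) k
    rw [List.foldl_map] at this
    rw [this, PySem.Dict.getD_empty, List.filter_map, List.map_map]
    simp [Function.comp_def]
  rw [hfold, PySem.Dict.items_eq_map_keys _ hnd [], hkeys]
  exact List.map_congr_left (fun k _ => by rw [hgetD k])
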